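-- pv_equiv track=rewrite | github.com/Kudito98/Codesignal-tasks | code-arcade/128-amazonCheckmate/amazonCheckmate.py | solution
-- ===== SOURCE A (Python) =====
-- from itertools import count, product
-- from typing import NamedTuple
--
-- class Position(NamedTuple):
--     x: int
--     y: int
--
--     @classmethod
--     def parse(cls, s):
--         return cls(*(ord(c) - ord(b) for c, b in zip(s, "a1")))
--
--
--     def in_bounds(self):
--         return 0 <= self.x < 8 and 0 <= self.y < 8
--
-- def solution(king, amazon):
--     king, amazon = map(Position.parse, [king, amazon])
--     results = [0] * 4
--     king_moves = set(neighbours(king))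
--     amazon_moves = set(get_amazon_moves(amazon, king))
--     for position in all_positions():
--         if (
--             position != amazon and
--             position != king and
--             position not in king_moves
--         ):
--             results[check(position, king_moves, amazon_moves)] += 1
--     return results
--
-- def all_positions():
--     return (
--         Position(x, y)
--         for x, y in product(range(8), repeat=2)
--     )
--
-- def get_amazon_moves(amazon, king):
--     for dx, dy in product([-2, -1, 1, 2], repeat=2):
--         if abs(dx) != abs(dy):
--             move = Position(amazon.x + dx, amazon.y + dy)
--             if move.in_bounds():
--                 yield move
--     for dx, dy in product([-1, 0, 1], repeat=2):
--         if not dx == dy == 0: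
--             for position in map(Position, count(amazon.x + dx, dx), count(amazon.y + dy, dy)):
--                 if not position.in_bounds() or position == king:
--                     break
--                 yield position
--
-- def neighbours(position):
--     for dx, dy in product([-1, 0, 1], repeat=2):
--         neighbor = Position(position.x + dx, position.y + dy)
--         if neighbor.in_bounds() and neighbor != position:
--             yield neighbor
--
-- def check(position, king_moves, amazon_moves):
--     not_under_attack = position not in amazon_moves
--     can_move = any(
--         n not in king_moves and n not in amazon_moves
--         for n in neighbours(position)
--     )
--     return not_under_attack * 2 + can_move
-- ===== SOURCE B (Python) =====
-- def solution(king, amazon):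
--     kx, ky = ord(king[0]) - 97, ord(king[1]) - 49
--     ax, ay = ord(amazon[0]) - 97, ord(amazon[1]) - 49
--
--     def in_bounds(x, y):
--         return 0 <= x < 8 and 0 <= y < 8
--
--     def sign(v):
--         return (v > 0) - (v < 0)
--
--     def attacked(x, y):
--         # is the in-bounds square (x, y) attacked by the amazon (king may block rays)?
--         dx, dy = x - ax, y - ay
--         if dx == 0 and dy == 0:
--             return False
--         if {abs(dx), abs(dy)} == {1, 2}:
--             return True
--         if dx != 0 and dy != 0 and abs(dx) != abs(dy):
--             return False
--         sx, sy = sign(dx), sign(dy)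
--         if not in_bounds(ax + sx, ay + sy):
--             return False
--         k = max(abs(dx), abs(dy))
--         ex, ey = kx - ax, ky - ay
--         j = ex * sx if sx != 0 else ey * sy
--         if ex == j * sx and ey == j * sy and 1 <= j <= k:
--             return False  # king stands on the ray at or before (x, y)
--         return True
--
--     def is_king_move(x, y):
--         return (x, y) != (kx, ky) and max(abs(x - kx), abs(y - ky)) <= 1
--
--     results = [0] * 4
--     for x in range(8):
--         for y in range(8):
--             if (x, y) == (ax, ay) or (x, y) == (kx, ky) or is_king_move(x, y):
--                 continue
--             can_move = any(
--                 in_bounds(x + dx, y + dy)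
--                 and (dx, dy) != (0, 0)
--                 and not is_king_move(x + dx, y + dy)
--                 and not attacked(x + dx, y + dy)
--                 for dx in (-1, 0, 1) for dy in (-1, 0, 1)
--             )
--             results[(not attacked(x, y)) * 2 + can_move] += 1
--     return results
-- ===== Notes on version B (the rewrite author's own statement) =====
-- stated objective: simpler
-- what changed: B drops A's generation of the amazon's full move set (knight offsets plus step-by-step ray walking with king blocking) and the king-move set; instead it decides attack of each square by closed-form arithmetic (knight-offset test, collinearity plus sign/step arithmetic for the king block) and king moves by a Chebyshev-distance test.
import Mathlib
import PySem

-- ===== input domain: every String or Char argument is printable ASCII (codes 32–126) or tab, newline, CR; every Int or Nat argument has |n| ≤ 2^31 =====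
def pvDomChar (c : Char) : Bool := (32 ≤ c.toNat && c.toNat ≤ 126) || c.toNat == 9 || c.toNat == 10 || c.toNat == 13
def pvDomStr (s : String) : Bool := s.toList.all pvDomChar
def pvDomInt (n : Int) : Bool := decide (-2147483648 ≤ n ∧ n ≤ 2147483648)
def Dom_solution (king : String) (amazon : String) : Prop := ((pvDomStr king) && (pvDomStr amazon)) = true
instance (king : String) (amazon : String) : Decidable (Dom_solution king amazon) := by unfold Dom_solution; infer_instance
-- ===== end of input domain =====

-- B replaces A's generate-all-amazon-moves sets by a closed-form arithmetic attack predicate (objective: simpler).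

-- ===== PORT A =====
-- Position.parse: ord(c) - ord(b) for zip(s, "a1"); Pre_ guarantees ≥ 2 chars (else Python raises TypeError)
def pvParse (s : String) : Int × Int :=
  match s.toList with
  | c0 :: c1 :: _ => (((c0.toNat : Int) - 97), ((c1.toNat : Int) - 49))
  | _ => (0, 0)   -- unreachable under Pre_solution

def pvInb (p : Int × Int) : Bool := decide (0 ≤ p.1 ∧ p.1 < 8 ∧ 0 ≤ p.2 ∧ p.2 < 8)

-- product([-1, 0, 1], repeat=2) / product([-2, -1, 1, 2], repeat=2)
def pvOff3 : List (Int × Int) :=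
  ([-1, 0, 1] : List Int).flatMap (fun dx => ([-1, 0, 1] : List Int).map (fun dy => (dx, dy)))
def pvOff4 : List (Int × Int) :=
  ([-2, -1, 1, 2] : List Int).flatMap (fun dx => ([-2, -1, 1, 2] : List Int).map (fun dy => (dx, dy)))

def pvNeighbours (pos : Int × Int) : List (Int × Int) :=
  pvOff3.filterMap (fun d =>
    let n := (pos.1 + d.1, pos.2 + d.2)
    if pvInb n && n != pos then some n else none)

-- the unbounded count(...) ray loop; it always breaks within 9 steps (each yielded square is
-- in bounds and the step is nonzero), so fuel 16 is never exhausted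
def pvRay (fuel : Nat) (p d king : Int × Int) : List (Int × Int) :=
  match fuel with
  | 0 => []
  | f + 1 =>
    if !pvInb p || p == king then []
    else p :: pvRay f (p.1 + d.1, p.2 + d.2) d king

def pvAmazonMoves (amazon king : Int × Int) : List (Int × Int) :=
  pvOff4.filterMap (fun d =>
    if d.1.natAbs != d.2.natAbs then
      let m := (amazon.1 + d.1, amazon.2 + d.2)
      if pvInb m then some m else none
    else none)
  ++ pvOff3.flatMap (fun d =>
    if d == ((0 : Int), (0 : Int)) then []
    else pvRay 16 (amazon.1 + d.1, amazon.2 + d.2) d king)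

def pvCheck (p : Int × Int) (kingMoves amazonMoves : PySem.Set (Int × Int)) : Nat :=
  let notUnderAttack := !(PySem.Set.contains amazonMoves p)
  let canMove := (pvNeighbours p).any (fun n =>
    !(PySem.Set.contains kingMoves n) && !(PySem.Set.contains amazonMoves n))
  (if notUnderAttack then 2 else 0) + (if canMove then 1 else 0)

def pvAllPositions : List (Int × Int) :=
  (List.range 8).flatMap (fun x => (List.range 8).map (fun y => ((x : Int), (y : Int))))

def solution (king : String) (amazon : String) : List Int :=
  let k := pvParse king
  let a := pvParse amazon
  let kingMoves : PySem.Set (Int × Int) := PySem.Set.ofList (pvNeighbours k)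
  let amazonMoves : PySem.Set (Int × Int) := PySem.Set.ofList (pvAmazonMoves a k)
  pvAllPositions.foldl (fun results p =>
    if p != a && p != k && !(PySem.Set.contains kingMoves p) then
      let idx := pvCheck p kingMoves amazonMoves
      results.set idx (results.getD idx 0 + 1)
    else results) ([0, 0, 0, 0] : List Int)

-- ===== PORT B =====
def pvSign (v : Int) : Int := (if 0 < v then 1 else 0) - (if v < 0 then 1 else 0)

def pvInbB (x y : Int) : Bool := decide (0 ≤ x ∧ x < 8 ∧ 0 ≤ y ∧ y < 8)

def pvAttacked (ax ay kx ky x y : Int) : Bool :=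
  let dx := x - ax
  let dy := y - ay
  if dx == 0 && dy == 0 then false
  else if (dx.natAbs == 1 && dy.natAbs == 2) || (dx.natAbs == 2 && dy.natAbs == 1) then true
  else if dx != 0 && dy != 0 && dx.natAbs != dy.natAbs then false
  else
    let sx := pvSign dx
    let sy := pvSign dy
    if !pvInbB (ax + sx) (ay + sy) then false
    else
      let k : Int := ((max dx.natAbs dy.natAbs : Nat) : Int)
      let ex := kx - ax
      let ey := ky - ay
      let j := if sx != 0 then ex * sx else ey * sy
      if ex == j * sx && ey == j * sy && decide (1 ≤ j) && decide (j ≤ k) then false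
      else true

def pvIsKingMove (kx ky x y : Int) : Bool :=
  !(x == kx && y == ky) && decide (max (x - kx).natAbs (y - ky).natAbs ≤ 1)

def solution_alt (king : String) (amazon : String) : List Int :=
  match king.toList, amazon.toList with
  | k0 :: k1 :: _, a0 :: a1 :: _ =>
    let kx := (k0.toNat : Int) - 97
    let ky := (k1.toNat : Int) - 49
    let ax := (a0.toNat : Int) - 97
    let ay := (a1.toNat : Int) - 49
    (List.range 8).foldl (fun results xn =>
      (List.range 8).foldl (fun results yn =>
        let x := (xn : Int)
        let y := (yn : Int)
        if (x == ax && y == ay) || (x == kx && y == ky) || pvIsKingMove kx ky x y then results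
        else
          let canMove := ([-1, 0, 1] : List Int).any (fun dx => ([-1, 0, 1] : List Int).any (fun dy =>
            pvInbB (x + dx) (y + dy) && !(dx == 0 && dy == 0) &&
            !pvIsKingMove kx ky (x + dx) (y + dy) && !pvAttacked ax ay kx ky (x + dx) (y + dy)))
          let idx := (if !pvAttacked ax ay kx ky x y then 2 else 0) + (if canMove then 1 else 0)
          results.set idx (results.getD idx 0 + 1)) results) ([0, 0, 0, 0] : List Int)
  | _, _ => [0, 0, 0, 0]   -- unreachable under Pre_solution (Python raises IndexError)

-- ===== PRECONDITION & SPEC =====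
-- Pre_ excludes strings shorter than 2 characters, on which A raises TypeError (B raises IndexError).
def Pre_solution (king : String) (amazon : String) : Prop :=
  2 ≤ king.toList.length ∧ 2 ≤ amazon.toList.length
instance (king : String) (amazon : String) : Decidable (Pre_solution king amazon) := by
  unfold Pre_solution; infer_instance

def pvWitness_solution : String × String := ("a1", "d5")

def Spec_solution (king : String) (amazon : String) (out : List Int) : Prop := out = solution_alt king amazon
instance (king : String) (amazon : String) (out : List Int) : Decidable (Spec_solution king amazon out) := by unfold Spec_solution; infer_instance

-- ===== CLAIM (what is proved, stated in full; the proofs are below) =====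
def Claim_equal_solution : Prop := ∀ (king : String) (amazon : String), Dom_solution king amazon → Pre_solution king amazon → Spec_solution king amazon (solution king amazon)

-- ===== LEMMAS AND PROOFS =====

theorem pv_mem_ray (f : Nat) (d k n : Int × Int) :
    ∀ q : Int × Int, (n ∈ pvRay f q d k ↔
      ∃ i : Nat, i < f ∧ n = (q.1 + i * d.1, q.2 + i * d.2) ∧
        ∀ j : Nat, j ≤ i → (pvInb (q.1 + j * d.1, q.2 + j * d.2) = true ∧ (q.1 + j * d.1, q.2 + j * d.2) ≠ k)) := by
  induction f with
  | zero => intro q; simp [pvRay]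
  | succ f ih =>
    intro q
    rw [pvRay]
    by_cases hq : (!pvInb q || q == k) = true
    · rw [if_pos hq]
      simp only [List.not_mem_nil, false_iff, not_exists]
      intro i hi
      rcases hi with ⟨_, _, hall⟩
      have h0 := hall 0 (Nat.zero_le _)
      simp only [Nat.cast_zero, zero_mul, add_zero] at h0
      simp only [Bool.or_eq_true, Bool.not_eq_true', beq_iff_eq] at hq
      rcases hq with hq | hq
      · exact absurd h0.1 (by simp [hq])
      · exact h0.2 (by simpa using hq)
    · rw [if_neg hq]
      simp only [Bool.or_eq_true, Bool.not_eq_true', beq_iff_eq, not_or] at hq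
      obtain ⟨hinb, hne⟩ := hq
      constructor
      · intro hmem
        rcases List.mem_cons.mp hmem with rfl | hmem
        · refine ⟨0, Nat.succ_pos _, by simp, ?_⟩
          intro j hj
          interval_cases j
          simp only [Nat.cast_zero, zero_mul, add_zero]
          exact ⟨by simpa using hinb, hne⟩
        · obtain ⟨i, hif, hn, hall⟩ := (ih _).1 hmem
          refine ⟨i + 1, by omega, ?_, ?_⟩
          · rw [hn]
            have e1 : q.1 + d.1 + (i : Int) * d.1 = q.1 + ((i : Nat) + 1 : Nat) * d.1 := by
              push_cast; ring
            have e2 : q.2 + d.2 + (i : Int) * d.2 = q.2 + ((i : Nat) + 1 : Nat) * d.2 := by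
              push_cast; ring
            simp [e1, e2]
          · intro j hj
            match j with
            | 0 =>
              simp only [Nat.cast_zero, zero_mul, add_zero]
              exact ⟨by simpa using hinb, hne⟩
            | (j' + 1) =>
              have := hall j' (by omega)
              have e1 : q.1 + d.1 + (j' : Int) * d.1 = q.1 + ((j' : Nat) + 1 : Nat) * d.1 := by
                push_cast; ring
              have e2 : q.2 + d.2 + (j' : Int) * d.2 = q.2 + ((j' : Nat) + 1 : Nat) * d.2 := by
                push_cast; ring
              rw [e1, e2] at this
              exact this
      · rintro ⟨i, hif, hn, hall⟩
        match i with
        | 0 =>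
          simp only [Nat.cast_zero, zero_mul, add_zero] at hn
          rw [hn]
          exact List.mem_cons_self
        | (i' + 1) =>
          apply List.mem_cons_of_mem
          apply (ih _).2
          refine ⟨i', by omega, ?_, ?_⟩
          · rw [hn]
            have e1 : q.1 + d.1 + (i' : Int) * d.1 = q.1 + ((i' : Nat) + 1 : Nat) * d.1 := by
              push_cast; ring
            have e2 : q.2 + d.2 + (i' : Int) * d.2 = q.2 + ((i' : Nat) + 1 : Nat) * d.2 := by
              push_cast; ring
            simp [e1, e2]
          · intro j hj
            have := hall (j + 1) (by omega)
            have e1 : q.1 + d.1 + (j : Int) * d.1 = q.1 + ((j : Nat) + 1 : Nat) * d.1 := by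
              push_cast; ring
            have e2 : q.2 + d.2 + (j : Int) * d.2 = q.2 + ((j : Nat) + 1 : Nat) * d.2 := by
              push_cast; ring
            rw [e1, e2]
            exact this

def pvInbP (x y : Int) : Prop := 0 ≤ x ∧ x < 8 ∧ 0 ≤ y ∧ y < 8

def pvMknight (ax ay x y : Int) : Prop :=
  ((x - ax).natAbs = 1 ∧ (y - ay).natAbs = 2) ∨ ((x - ax).natAbs = 2 ∧ (y - ay).natAbs = 1)

def pvMray (ax ay kx ky x y : Int) : Prop :=
  ¬(x - ax = 0 ∧ y - ay = 0) ∧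
  (x - ax = 0 ∨ y - ay = 0 ∨ (x - ax).natAbs = (y - ay).natAbs) ∧
  pvInbP (ax + pvSign (x - ax)) (ay + pvSign (y - ay)) ∧
  ¬ ∃ j : Int, 1 ≤ j ∧ j ≤ ((max (x - ax).natAbs (y - ay).natAbs : Nat) : Int) ∧
      kx = ax + j * pvSign (x - ax) ∧ ky = ay + j * pvSign (y - ay)

theorem pvSign_of_pos {v : Int} (h : 0 < v) : pvSign v = 1 := by
  simp [pvSign, h, not_lt.mpr (le_of_lt h)]

theorem pvSign_of_neg {v : Int} (h : v < 0) : pvSign v = -1 := by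
  simp [pvSign, h, not_lt.mpr (le_of_lt h)]

theorem pvSign_of_zero {v : Int} (h : v = 0) : pvSign v = 0 := by
  simp [pvSign, h]

theorem pv_att_iff (ax ay kx ky x y : Int) :
    pvAttacked ax ay kx ky x y = true ↔ (pvMknight ax ay x y ∨ pvMray ax ay kx ky x y) := by
  unfold pvAttacked
  dsimp only
  split_ifs with h1 h2 h3 h4 h5 hb hb'
  -- G1: amazon square itself
  · simp only [Bool.and_eq_true, beq_iff_eq] at h1
    simp only [false_iff, pvMknight, pvMray]
    rintro (hk | hr)
    · omega
    · exact hr.1 h1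
  -- G2: knight shape
  · simp only [Bool.or_eq_true, Bool.and_eq_true, beq_iff_eq] at h2
    simp only [true_iff]
    left
    unfold pvMknight
    omega
  -- G3: not collinear
  · simp only [Bool.and_eq_true, bne_iff_ne, ne_eq] at h3
    simp only [Bool.or_eq_true, Bool.and_eq_true, beq_iff_eq, not_or, not_and] at h2
    simp only [false_iff, pvMknight, pvMray]
    rintro (hk | hr)
    · omega
    · rcases hr.2.1 with h | h | h <;> omega
  -- G4: first step off board
  · simp only [Bool.not_eq_eq_eq_not, Bool.not_true, pvInbB, decide_eq_false_iff_not] at h4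
    simp only [Bool.or_eq_true, Bool.and_eq_true, beq_iff_eq, not_or, not_and] at h2
    simp only [false_iff, pvMknight, pvMray, pvInbP]
    rintro (hk | hr)
    · omega
    · exact h4 hr.2.2.1
  -- G5: sx ≠ 0, king blocks
  · simp only [Bool.and_eq_true, beq_iff_eq, decide_eq_true_eq] at hb
    simp only [Bool.or_eq_true, Bool.and_eq_true, beq_iff_eq, not_or, not_and] at h2
    simp only [bne_iff_ne, ne_eq] at h5
    simp only [false_iff, pvMknight, pvMray]
    rintro (hk | hr)
    · omega
    · apply hr.2.2.2
      have hdx0 : x - ax ≠ 0 := fun h => h5 (by rw [pvSign_of_zero h])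
      rcases lt_trichotomy (x - ax) 0 with h | h | h <;>
        rcases lt_trichotomy (y - ay) 0 with h' | h' | h' <;>
        simp only [pvSign_of_pos, pvSign_of_neg, pvSign_of_zero, h, h'] at hb ⊢ <;>
        first
        | omega
        | exact ⟨kx - ax, by omega⟩
        | exact ⟨ax - kx, by omega⟩
  -- G6: sx ≠ 0, ray reaches the square
  · simp only [Bool.and_eq_true, beq_iff_eq, decide_eq_true_eq, not_and] at hb
    simp only [Bool.and_eq_true, beq_iff_eq] at h1
    simp only [Bool.and_eq_true, bne_iff_ne, ne_eq, not_and] at h3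
    simp only [Bool.not_eq_eq_eq_not, Bool.not_true, pvInbB, decide_eq_false_iff_not,
      not_not] at h4
    simp only [bne_iff_ne, ne_eq] at h5
    simp only [true_iff]
    right
    refine ⟨by omega, by tauto, by simpa [pvInbP, pvInbB] using h4, ?_⟩
    rintro ⟨j, hj1, hj2, hj3, hj4⟩
    have hdx0 : x - ax ≠ 0 := fun h => h5 (by rw [pvSign_of_zero h])
    rcases lt_trichotomy (x - ax) 0 with h | h | h <;>
      rcases lt_trichotomy (y - ay) 0 with h' | h' | h' <;>
      simp only [pvSign_of_pos, pvSign_of_neg, pvSign_of_zero, h, h'] at hb hj3 hj4 <;>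
      omega
  -- G7: sx = 0, king blocks
  · simp only [Bool.and_eq_true, beq_iff_eq, decide_eq_true_eq] at hb'
    simp only [Bool.or_eq_true, Bool.and_eq_true, beq_iff_eq, not_or, not_and] at h2
    simp only [bne_iff_ne, ne_eq, not_not] at h5
    simp only [Bool.and_eq_true, beq_iff_eq] at h1
    simp only [false_iff, pvMknight, pvMray]
    rintro (hk | hr)
    · omega
    · apply hr.2.2.2
      have hdx0 : x - ax = 0 := by
        rcases lt_trichotomy (x - ax) 0 with h | h | h
        · rw [pvSign_of_neg h] at h5; omega
        · exact h
        · rw [pvSign_of_pos h] at h5; omega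
      rcases lt_trichotomy (y - ay) 0 with h' | h' | h' <;>
        simp only [pvSign_of_pos, pvSign_of_neg, pvSign_of_zero, h', hdx0] at hb' ⊢ <;>
        first
        | omega
        | exact ⟨ky - ay, by omega⟩
        | exact ⟨ay - ky, by omega⟩
  -- G8: sx = 0, ray reaches the square
  · simp only [Bool.and_eq_true, beq_iff_eq, decide_eq_true_eq, not_and] at hb'
    simp only [Bool.and_eq_true, beq_iff_eq] at h1
    simp only [Bool.and_eq_true, bne_iff_ne, ne_eq, not_and] at h3
    simp only [Bool.not_eq_eq_eq_not, Bool.not_true, pvInbB, decide_eq_false_iff_not,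
      not_not] at h4
    simp only [bne_iff_ne, ne_eq, not_not] at h5
    simp only [true_iff]
    right
    have hdx0 : x - ax = 0 := by
      rcases lt_trichotomy (x - ax) 0 with h | h | h
      · rw [pvSign_of_neg h] at h5; omega
      · exact h
      · rw [pvSign_of_pos h] at h5; omega
    refine ⟨by omega, by tauto, by simpa [pvInbP, pvInbB] using h4, ?_⟩
    rintro ⟨j, hj1, hj2, hj3, hj4⟩
    rcases lt_trichotomy (y - ay) 0 with h' | h' | h' <;>
      simp only [pvSign_of_pos, pvSign_of_neg, pvSign_of_zero, h', hdx0] at hb' hj3 hj4 <;>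
      omega
theorem pv_knight_iff (ax ay x y : Int) (hx : pvInbP x y) :
    (∃ a : Int × Int,
      ((a = (-2, -2) ∨ a = (-2, -1) ∨ a = (-2, 1) ∨ a = (-2, 2)) ∨
       (a = (-1, -2) ∨ a = (-1, -1) ∨ a = (-1, 1) ∨ a = (-1, 2)) ∨
       (a = (1, -2) ∨ a = (1, -1) ∨ a = (1, 1) ∨ a = (1, 2)) ∨
       a = (2, -2) ∨ a = (2, -1) ∨ a = (2, 1) ∨ a = (2, 2)) ∧
      (if (a.1.natAbs != a.2.natAbs) = true then
          if pvInb (ax + a.1, ay + a.2) = true then some (ax + a.1, ay + a.2) else none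
        else none) =
        some (x, y)) ↔ pvMknight ax ay x y := by
  have n1 : ((-1 : Int)).natAbs = 1 := by decide
  have n2 : ((-2 : Int)).natAbs = 2 := by decide
  have p1 : ((1 : Int)).natAbs = 1 := by decide
  have p2 : ((2 : Int)).natAbs = 2 := by decide
  simp only [or_and_right, exists_or, exists_eq_left, Option.ite_none_right_eq_some,
    Option.some.injEq, Prod.mk.injEq, pvInb, decide_eq_true_eq, bne_iff_ne, ne_eq,
    n1, n2, p1, p2, show ¬(2 : Nat) = 1 by decide, show ¬(1 : Nat) = 2 by decide, not_true,
    not_false_eq_true, false_and, false_or, true_and, or_false]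
  simp only [pvInbP] at hx
  simp only [pvMknight]
  constructor
  · rintro ((h | h) | (h | h) | (h | h) | h | h) <;> omega
  · intro hk
    have hdx : x - ax = 1 ∨ x - ax = -1 ∨ x - ax = 2 ∨ x - ax = -2 := by omega
    have hdy : y - ay = 1 ∨ y - ay = -1 ∨ y - ay = 2 ∨ y - ay = -2 := by omega
    rcases hdx with h3 | h3 | h3 | h3 <;> rcases hdy with h4 | h4 | h4 | h4 <;>
      first
      | exact Or.inl (Or.inl (by omega))
      | exact Or.inl (Or.inr (by omega))
      | exact Or.inr (Or.inl (Or.inl (by omega)))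
      | exact Or.inr (Or.inl (Or.inr (by omega)))
      | exact Or.inr (Or.inr (Or.inl (Or.inl (by omega))))
      | exact Or.inr (Or.inr (Or.inl (Or.inr (by omega))))
      | exact Or.inr (Or.inr (Or.inr (Or.inl (by omega))))
      | exact Or.inr (Or.inr (Or.inr (Or.inr (by omega))))

theorem pv_mem_amazon (ax ay kx ky x y : Int) (hx : pvInbP x y) :
    ((x, y) ∈ pvAmazonMoves (ax, ay) (kx, ky)) ↔ (pvMknight ax ay x y ∨ pvMray ax ay kx ky x y) := by
  rw [pvAmazonMoves, List.mem_append]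
  simp only [pvOff4, pvOff3, List.flatMap_cons, List.map_cons, List.map_nil, List.flatMap_nil,
    List.append_nil, List.mem_filterMap, List.mem_flatMap, List.mem_cons, List.not_mem_nil,
    or_false, List.mem_append]
  apply or_congr
  · exact pv_knight_iff ax ay x y hx
  · -- ray moves
    simp only [or_and_right, exists_or, exists_eq_left, beq_iff_eq, Prod.mk.injEq]
    norm_num
    constructor
    · rintro ((hm | hm | hm) | (hm | hm) | hm | hm | hm)
      · -- d = (-1, -1)
        rw [pv_mem_ray] at hm
        obtain ⟨i, hi16, hn, hall⟩ := hm
        simp only [Prod.mk.injEq] at hn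
        obtain ⟨hnx, hny⟩ := hn
        norm_num at hnx hny
        have hsx : pvSign (x - ax) = (-1 : Int) := pvSign_of_neg (by omega)
        have hsy : pvSign (y - ay) = (-1 : Int) := pvSign_of_neg (by omega)
        have h0 := hall 0 (Nat.zero_le _)
        simp only [pvInb, decide_eq_true_eq] at h0
        obtain ⟨h0i, _⟩ := h0
        norm_num at h0i
        simp only [pvMray, pvInbP, hsx, hsy]
        refine ⟨by omega, by omega, by omega, ?_⟩
        rintro ⟨j, hj1, hj2, hj3, hj4⟩
        have hj5 := hall ((j - 1).toNat) (by omega)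
        simp only [pvInb, decide_eq_true_eq, ne_eq, Prod.mk.injEq, not_and] at hj5
        norm_num at hj3 hj4 hj5
        omega
      · -- d = (-1, 0)
        rw [pv_mem_ray] at hm
        obtain ⟨i, hi16, hn, hall⟩ := hm
        simp only [Prod.mk.injEq] at hn
        obtain ⟨hnx, hny⟩ := hn
        norm_num at hnx hny
        have hsx : pvSign (x - ax) = (-1 : Int) := pvSign_of_neg (by omega)
        have hsy : pvSign (y - ay) = (0 : Int) := pvSign_of_zero (by omega)
        have h0 := hall 0 (Nat.zero_le _)
        simp only [pvInb, decide_eq_true_eq] at h0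
        obtain ⟨h0i, _⟩ := h0
        norm_num at h0i
        simp only [pvMray, pvInbP, hsx, hsy]
        refine ⟨by omega, by omega, by omega, ?_⟩
        rintro ⟨j, hj1, hj2, hj3, hj4⟩
        have hj5 := hall ((j - 1).toNat) (by omega)
        simp only [pvInb, decide_eq_true_eq, ne_eq, Prod.mk.injEq, not_and] at hj5
        norm_num at hj3 hj4 hj5
        omega
      · -- d = (-1, 1)
        rw [pv_mem_ray] at hm
        obtain ⟨i, hi16, hn, hall⟩ := hm
        simp only [Prod.mk.injEq] at hn
        obtain ⟨hnx, hny⟩ := hn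
        norm_num at hnx hny
        have hsx : pvSign (x - ax) = (-1 : Int) := pvSign_of_neg (by omega)
        have hsy : pvSign (y - ay) = (1 : Int) := pvSign_of_pos (by omega)
        have h0 := hall 0 (Nat.zero_le _)
        simp only [pvInb, decide_eq_true_eq] at h0
        obtain ⟨h0i, _⟩ := h0
        norm_num at h0i
        simp only [pvMray, pvInbP, hsx, hsy]
        refine ⟨by omega, by omega, by omega, ?_⟩
        rintro ⟨j, hj1, hj2, hj3, hj4⟩
        have hj5 := hall ((j - 1).toNat) (by omega)
        simp only [pvInb, decide_eq_true_eq, ne_eq, Prod.mk.injEq, not_and] at hj5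
        norm_num at hj3 hj4 hj5
        omega
      · -- d = (0, -1)
        rw [pv_mem_ray] at hm
        obtain ⟨i, hi16, hn, hall⟩ := hm
        simp only [Prod.mk.injEq] at hn
        obtain ⟨hnx, hny⟩ := hn
        norm_num at hnx hny
        have hsx : pvSign (x - ax) = (0 : Int) := pvSign_of_zero (by omega)
        have hsy : pvSign (y - ay) = (-1 : Int) := pvSign_of_neg (by omega)
        have h0 := hall 0 (Nat.zero_le _)
        simp only [pvInb, decide_eq_true_eq] at h0
        obtain ⟨h0i, _⟩ := h0
        norm_num at h0i
        simp only [pvMray, pvInbP, hsx, hsy]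
        refine ⟨by omega, by omega, by omega, ?_⟩
        rintro ⟨j, hj1, hj2, hj3, hj4⟩
        have hj5 := hall ((j - 1).toNat) (by omega)
        simp only [pvInb, decide_eq_true_eq, ne_eq, Prod.mk.injEq, not_and] at hj5
        norm_num at hj3 hj4 hj5
        omega
      · -- d = (0, 1)
        rw [pv_mem_ray] at hm
        obtain ⟨i, hi16, hn, hall⟩ := hm
        simp only [Prod.mk.injEq] at hn
        obtain ⟨hnx, hny⟩ := hn
        norm_num at hnx hny
        have hsx : pvSign (x - ax) = (0 : Int) := pvSign_of_zero (by omega)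
        have hsy : pvSign (y - ay) = (1 : Int) := pvSign_of_pos (by omega)
        have h0 := hall 0 (Nat.zero_le _)
        simp only [pvInb, decide_eq_true_eq] at h0
        obtain ⟨h0i, _⟩ := h0
        norm_num at h0i
        simp only [pvMray, pvInbP, hsx, hsy]
        refine ⟨by omega, by omega, by omega, ?_⟩
        rintro ⟨j, hj1, hj2, hj3, hj4⟩
        have hj5 := hall ((j - 1).toNat) (by omega)
        simp only [pvInb, decide_eq_true_eq, ne_eq, Prod.mk.injEq, not_and] at hj5
        norm_num at hj3 hj4 hj5
        omega
      · -- d = (1, -1)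
        rw [pv_mem_ray] at hm
        obtain ⟨i, hi16, hn, hall⟩ := hm
        simp only [Prod.mk.injEq] at hn
        obtain ⟨hnx, hny⟩ := hn
        norm_num at hnx hny
        have hsx : pvSign (x - ax) = (1 : Int) := pvSign_of_pos (by omega)
        have hsy : pvSign (y - ay) = (-1 : Int) := pvSign_of_neg (by omega)
        have h0 := hall 0 (Nat.zero_le _)
        simp only [pvInb, decide_eq_true_eq] at h0
        obtain ⟨h0i, _⟩ := h0
        norm_num at h0i
        simp only [pvMray, pvInbP, hsx, hsy]
        refine ⟨by omega, by omega, by omega, ?_⟩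
        rintro ⟨j, hj1, hj2, hj3, hj4⟩
        have hj5 := hall ((j - 1).toNat) (by omega)
        simp only [pvInb, decide_eq_true_eq, ne_eq, Prod.mk.injEq, not_and] at hj5
        norm_num at hj3 hj4 hj5
        omega
      · -- d = (1, 0)
        rw [pv_mem_ray] at hm
        obtain ⟨i, hi16, hn, hall⟩ := hm
        simp only [Prod.mk.injEq] at hn
        obtain ⟨hnx, hny⟩ := hn
        norm_num at hnx hny
        have hsx : pvSign (x - ax) = (1 : Int) := pvSign_of_pos (by omega)
        have hsy : pvSign (y - ay) = (0 : Int) := pvSign_of_zero (by omega)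
        have h0 := hall 0 (Nat.zero_le _)
        simp only [pvInb, decide_eq_true_eq] at h0
        obtain ⟨h0i, _⟩ := h0
        norm_num at h0i
        simp only [pvMray, pvInbP, hsx, hsy]
        refine ⟨by omega, by omega, by omega, ?_⟩
        rintro ⟨j, hj1, hj2, hj3, hj4⟩
        have hj5 := hall ((j - 1).toNat) (by omega)
        simp only [pvInb, decide_eq_true_eq, ne_eq, Prod.mk.injEq, not_and] at hj5
        norm_num at hj3 hj4 hj5
        omega
      · -- d = (1, 1)
        rw [pv_mem_ray] at hm
        obtain ⟨i, hi16, hn, hall⟩ := hm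
        simp only [Prod.mk.injEq] at hn
        obtain ⟨hnx, hny⟩ := hn
        norm_num at hnx hny
        have hsx : pvSign (x - ax) = (1 : Int) := pvSign_of_pos (by omega)
        have hsy : pvSign (y - ay) = (1 : Int) := pvSign_of_pos (by omega)
        have h0 := hall 0 (Nat.zero_le _)
        simp only [pvInb, decide_eq_true_eq] at h0
        obtain ⟨h0i, _⟩ := h0
        norm_num at h0i
        simp only [pvMray, pvInbP, hsx, hsy]
        refine ⟨by omega, by omega, by omega, ?_⟩
        rintro ⟨j, hj1, hj2, hj3, hj4⟩
        have hj5 := hall ((j - 1).toNat) (by omega)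
        simp only [pvInb, decide_eq_true_eq, ne_eq, Prod.mk.injEq, not_and] at hj5
        norm_num at hj3 hj4 hj5
        omega
    · rintro ⟨hr0, hrc, hrinb, hrblk⟩
      rcases lt_trichotomy (x - ax) 0 with h | h | h <;>
        rcases lt_trichotomy (y - ay) 0 with h' | h' | h'
      · -- sign case (-1, -1)
        have hsx : pvSign (x - ax) = (-1 : Int) := pvSign_of_neg h
        have hsy : pvSign (y - ay) = (-1 : Int) := pvSign_of_neg h'
        rw [hsx, hsy] at hrinb hrblk
        simp only [pvInbP] at hrinb hx
        have hray : (x, y) ∈ pvRay 16 (ax + (-1 : Int), ay + (-1 : Int)) ((-1 : Int), (-1 : Int)) (kx, ky) := by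
          rw [pv_mem_ray]
          refine ⟨max (x - ax).natAbs (y - ay).natAbs - 1, by omega, ?_, ?_⟩
          · simp only [Prod.mk.injEq]
            constructor <;> omega
          · intro j hj
            constructor
            · simp only [pvInb, decide_eq_true_eq]
              refine ⟨?_, ?_, ?_, ?_⟩ <;> omega
            · simp only [ne_eq, Prod.mk.injEq, not_and]
              intro he1 he2
              apply hrblk
              refine ⟨(j : Int) + 1, by omega, by omega,
                by omega, by omega⟩
        exact Or.inl (Or.inl (hray))
      · -- sign case (-1, 0)
        have hsx : pvSign (x - ax) = (-1 : Int) := pvSign_of_neg h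
        have hsy : pvSign (y - ay) = (0 : Int) := pvSign_of_zero h'
        rw [hsx, hsy] at hrinb hrblk
        simp only [pvInbP] at hrinb hx
        have hray : (x, y) ∈ pvRay 16 (ax + (-1 : Int), ay) ((-1 : Int), (0 : Int)) (kx, ky) := by
          rw [pv_mem_ray]
          refine ⟨max (x - ax).natAbs (y - ay).natAbs - 1, by omega, ?_, ?_⟩
          · simp only [Prod.mk.injEq]
            constructor <;> omega
          · intro j hj
            constructor
            · simp only [pvInb, decide_eq_true_eq]
              refine ⟨?_, ?_, ?_, ?_⟩ <;> omega
            · simp only [ne_eq, Prod.mk.injEq, not_and]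
              intro he1 he2
              apply hrblk
              refine ⟨(j : Int) + 1, by omega, by omega,
                by omega, by omega⟩
        exact Or.inl (Or.inr (Or.inl (hray)))
      · -- sign case (-1, 1)
        have hsx : pvSign (x - ax) = (-1 : Int) := pvSign_of_neg h
        have hsy : pvSign (y - ay) = (1 : Int) := pvSign_of_pos h'
        rw [hsx, hsy] at hrinb hrblk
        simp only [pvInbP] at hrinb hx
        have hray : (x, y) ∈ pvRay 16 (ax + (-1 : Int), ay + (1 : Int)) ((-1 : Int), (1 : Int)) (kx, ky) := by
          rw [pv_mem_ray]
          refine ⟨max (x - ax).natAbs (y - ay).natAbs - 1, by omega, ?_, ?_⟩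
          · simp only [Prod.mk.injEq]
            constructor <;> omega
          · intro j hj
            constructor
            · simp only [pvInb, decide_eq_true_eq]
              refine ⟨?_, ?_, ?_, ?_⟩ <;> omega
            · simp only [ne_eq, Prod.mk.injEq, not_and]
              intro he1 he2
              apply hrblk
              refine ⟨(j : Int) + 1, by omega, by omega,
                by omega, by omega⟩
        exact Or.inl (Or.inr (Or.inr (hray)))
      · -- sign case (0, -1)
        have hsx : pvSign (x - ax) = (0 : Int) := pvSign_of_zero h
        have hsy : pvSign (y - ay) = (-1 : Int) := pvSign_of_neg h'
        rw [hsx, hsy] at hrinb hrblk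
        simp only [pvInbP] at hrinb hx
        have hray : (x, y) ∈ pvRay 16 (ax, ay + (-1 : Int)) ((0 : Int), (-1 : Int)) (kx, ky) := by
          rw [pv_mem_ray]
          refine ⟨max (x - ax).natAbs (y - ay).natAbs - 1, by omega, ?_, ?_⟩
          · simp only [Prod.mk.injEq]
            constructor <;> omega
          · intro j hj
            constructor
            · simp only [pvInb, decide_eq_true_eq]
              refine ⟨?_, ?_, ?_, ?_⟩ <;> omega
            · simp only [ne_eq, Prod.mk.injEq, not_and]
              intro he1 he2
              apply hrblk
              refine ⟨(j : Int) + 1, by omega, by omega,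
                by omega, by omega⟩
        exact Or.inr (Or.inl (Or.inl (hray)))
      · exact absurd ⟨h, h'⟩ hr0
      · -- sign case (0, 1)
        have hsx : pvSign (x - ax) = (0 : Int) := pvSign_of_zero h
        have hsy : pvSign (y - ay) = (1 : Int) := pvSign_of_pos h'
        rw [hsx, hsy] at hrinb hrblk
        simp only [pvInbP] at hrinb hx
        have hray : (x, y) ∈ pvRay 16 (ax, ay + (1 : Int)) ((0 : Int), (1 : Int)) (kx, ky) := by
          rw [pv_mem_ray]
          refine ⟨max (x - ax).natAbs (y - ay).natAbs - 1, by omega, ?_, ?_⟩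
          · simp only [Prod.mk.injEq]
            constructor <;> omega
          · intro j hj
            constructor
            · simp only [pvInb, decide_eq_true_eq]
              refine ⟨?_, ?_, ?_, ?_⟩ <;> omega
            · simp only [ne_eq, Prod.mk.injEq, not_and]
              intro he1 he2
              apply hrblk
              refine ⟨(j : Int) + 1, by omega, by omega,
                by omega, by omega⟩
        exact Or.inr (Or.inl (Or.inr (hray)))
      · -- sign case (1, -1)
        have hsx : pvSign (x - ax) = (1 : Int) := pvSign_of_pos h
        have hsy : pvSign (y - ay) = (-1 : Int) := pvSign_of_neg h'
        rw [hsx, hsy] at hrinb hrblk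
        simp only [pvInbP] at hrinb hx
        have hray : (x, y) ∈ pvRay 16 (ax + (1 : Int), ay + (-1 : Int)) ((1 : Int), (-1 : Int)) (kx, ky) := by
          rw [pv_mem_ray]
          refine ⟨max (x - ax).natAbs (y - ay).natAbs - 1, by omega, ?_, ?_⟩
          · simp only [Prod.mk.injEq]
            constructor <;> omega
          · intro j hj
            constructor
            · simp only [pvInb, decide_eq_true_eq]
              refine ⟨?_, ?_, ?_, ?_⟩ <;> omega
            · simp only [ne_eq, Prod.mk.injEq, not_and]
              intro he1 he2
              apply hrblk
              refine ⟨(j : Int) + 1, by omega, by omega,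
                by omega, by omega⟩
        exact Or.inr (Or.inr (Or.inl (hray)))
      · -- sign case (1, 0)
        have hsx : pvSign (x - ax) = (1 : Int) := pvSign_of_pos h
        have hsy : pvSign (y - ay) = (0 : Int) := pvSign_of_zero h'
        rw [hsx, hsy] at hrinb hrblk
        simp only [pvInbP] at hrinb hx
        have hray : (x, y) ∈ pvRay 16 (ax + (1 : Int), ay) ((1 : Int), (0 : Int)) (kx, ky) := by
          rw [pv_mem_ray]
          refine ⟨max (x - ax).natAbs (y - ay).natAbs - 1, by omega, ?_, ?_⟩
          · simp only [Prod.mk.injEq]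
            constructor <;> omega
          · intro j hj
            constructor
            · simp only [pvInb, decide_eq_true_eq]
              refine ⟨?_, ?_, ?_, ?_⟩ <;> omega
            · simp only [ne_eq, Prod.mk.injEq, not_and]
              intro he1 he2
              apply hrblk
              refine ⟨(j : Int) + 1, by omega, by omega,
                by omega, by omega⟩
        exact Or.inr (Or.inr (Or.inr (Or.inl (hray))))
      · -- sign case (1, 1)
        have hsx : pvSign (x - ax) = (1 : Int) := pvSign_of_pos h
        have hsy : pvSign (y - ay) = (1 : Int) := pvSign_of_pos h'
        rw [hsx, hsy] at hrinb hrblk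
        simp only [pvInbP] at hrinb hx
        have hray : (x, y) ∈ pvRay 16 (ax + (1 : Int), ay + (1 : Int)) ((1 : Int), (1 : Int)) (kx, ky) := by
          rw [pv_mem_ray]
          refine ⟨max (x - ax).natAbs (y - ay).natAbs - 1, by omega, ?_, ?_⟩
          · simp only [Prod.mk.injEq]
            constructor <;> omega
          · intro j hj
            constructor
            · simp only [pvInb, decide_eq_true_eq]
              refine ⟨?_, ?_, ?_, ?_⟩ <;> omega
            · simp only [ne_eq, Prod.mk.injEq, not_and]
              intro he1 he2
              apply hrblk
              refine ⟨(j : Int) + 1, by omega, by omega,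
                by omega, by omega⟩
        exact Or.inr (Or.inr (Or.inr (Or.inr (hray))))

theorem pv_mem_nbr (px py x y : Int) :
    ((x, y) ∈ pvNeighbours (px, py)) ↔
      (¬(x = px ∧ y = py) ∧ pvInbP x y ∧ max (x - px).natAbs (y - py).natAbs ≤ 1) := by
  simp only [pvNeighbours, pvOff3, List.flatMap_cons, List.map_cons, List.map_nil,
    List.flatMap_nil, List.append_nil, List.mem_filterMap, List.mem_cons, List.not_mem_nil,
    or_false, List.mem_append, or_and_right, exists_or, exists_eq_left,
    Option.ite_none_right_eq_some, Option.some.injEq, Prod.mk.injEq, Bool.and_eq_true,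
    bne_iff_ne, ne_eq, pvInb, decide_eq_true_eq, pvInbP]
  constructor
  · rintro ((h | h | h) | (h | h | h) | (h | h | h)) <;>
      · obtain ⟨⟨hi, hne⟩, he1, he2⟩ := h
        simp only [not_and] at hne
        refine ⟨?_, by omega, by omega⟩
        intro h1
        omega
  · rintro ⟨hne, hinb, hcheb⟩
    have hdx : x - px = -1 ∨ x - px = 0 ∨ x - px = 1 := by omega
    have hdy : y - py = -1 ∨ y - py = 0 ∨ y - py = 1 := by omega
    rcases hdx with h3 | h3 | h3 <;> rcases hdy with h4 | h4 | h4
    · exact Or.inl (Or.inl ⟨⟨by omega, by omega⟩, by omega, by omega⟩)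
    · exact Or.inl (Or.inr (Or.inl ⟨⟨by omega, by omega⟩, by omega, by omega⟩))
    · exact Or.inl (Or.inr (Or.inr ⟨⟨by omega, by omega⟩, by omega, by omega⟩))
    · exact Or.inr (Or.inl (Or.inl ⟨⟨by omega, by omega⟩, by omega, by omega⟩))
    · exact absurd (by omega) hne
    · exact Or.inr (Or.inl (Or.inr (Or.inr ⟨⟨by omega, by omega⟩, by omega, by omega⟩)))
    · exact Or.inr (Or.inr (Or.inl ⟨⟨by omega, by omega⟩, by omega, by omega⟩))
    · exact Or.inr (Or.inr (Or.inr (Or.inl ⟨⟨by omega, by omega⟩, by omega, by omega⟩)))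
    · exact Or.inr (Or.inr (Or.inr (Or.inr ⟨⟨by omega, by omega⟩, by omega, by omega⟩)))

theorem pv_contains_king (kx ky u v : Int) (hu : pvInbP u v) :
    PySem.Set.contains (PySem.Set.ofList (pvNeighbours (kx, ky))) (u, v) = pvIsKingMove kx ky u v := by
  apply Bool.eq_iff_iff.mpr
  rw [PySem.Set.contains_iff, PySem.Set.mem_ofList, pv_mem_nbr]
  simp only [pvIsKingMove, Bool.and_eq_true, Bool.not_eq_eq_eq_not, Bool.not_true,
    Bool.and_eq_false_iff, beq_eq_false_iff_ne, ne_eq, decide_eq_true_eq]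
  constructor
  · rintro ⟨hne, _, hm⟩
    exact ⟨by tauto, hm⟩
  · rintro ⟨hne, hm⟩
    refine ⟨?_, hu, hm⟩
    rintro ⟨h1, h2⟩
    rcases hne with h | h
    · exact h h1
    · exact h h2

theorem pv_contains_amazon (ax ay kx ky u v : Int) (hu : pvInbP u v) :
    PySem.Set.contains (PySem.Set.ofList (pvAmazonMoves (ax, ay) (kx, ky))) (u, v) =
      pvAttacked ax ay kx ky u v := by
  apply Bool.eq_iff_iff.mpr
  rw [PySem.Set.contains_iff, PySem.Set.mem_ofList, pv_mem_amazon ax ay kx ky u v hu,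
    ← pv_att_iff]

theorem pv_canmove_eq (ax ay kx ky x y : Int) :
    ((pvNeighbours (x, y)).any (fun n =>
        !(PySem.Set.contains (PySem.Set.ofList (pvNeighbours (kx, ky))) n) &&
        !(PySem.Set.contains (PySem.Set.ofList (pvAmazonMoves (ax, ay) (kx, ky))) n))) =
    (([-1, 0, 1] : List Int).any (fun dx => ([-1, 0, 1] : List Int).any (fun dy =>
        pvInbB (x + dx) (y + dy) && !(dx == 0 && dy == 0) &&
        !pvIsKingMove kx ky (x + dx) (y + dy) && !pvAttacked ax ay kx ky (x + dx) (y + dy)))) := by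
  apply Bool.eq_iff_iff.mpr
  simp only [List.any_eq_true]
  constructor
  · rintro ⟨⟨nx, ny⟩, hn, hg⟩
    rw [pv_mem_nbr] at hn
    obtain ⟨hne, hninb, hcheb⟩ := hn
    refine ⟨nx - x, by simp; omega, ny - y, by simp; omega, ?_⟩
    have e1 : x + (nx - x) = nx := by ring
    have e2 : y + (ny - y) = ny := by ring
    rw [e1, e2]
    rw [pv_contains_king kx ky nx ny hninb, pv_contains_amazon ax ay kx ky nx ny hninb] at hg
    simp only [Bool.and_eq_true] at hg ⊢
    refine ⟨⟨⟨?_, ?_⟩, hg.1⟩, hg.2⟩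
    · simp only [pvInbB, decide_eq_true_eq]
      simp only [pvInbP] at hninb
      exact hninb
    · simp only [Bool.not_eq_eq_eq_not, Bool.not_true, Bool.and_eq_false_iff,
        beq_eq_false_iff_ne, ne_eq]
      by_cases h1 : nx - x = 0
      · right; intro h2; exact hne ⟨by omega, by omega⟩
      · left; exact h1
  · rintro ⟨dx, hdx, dy, hdy, hc⟩
    simp only [List.mem_cons, List.not_mem_nil, or_false] at hdx hdy
    simp only [Bool.and_eq_true] at hc
    obtain ⟨⟨⟨hinb, hnz⟩, hkm⟩, hat⟩ := hc
    have hninb : pvInbP (x + dx) (y + dy) := by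
      simp only [pvInbB, decide_eq_true_eq] at hinb
      simp only [pvInbP]
      exact hinb
    refine ⟨(x + dx, y + dy), ?_, ?_⟩
    · rw [pv_mem_nbr]
      refine ⟨?_, hninb, ?_⟩
      · simp only [Bool.not_eq_eq_eq_not, Bool.not_true, Bool.and_eq_false_iff,
          beq_eq_false_iff_ne, ne_eq] at hnz
        rintro ⟨h1, h2⟩
        rcases hnz with h | h <;> [exact h (by omega); exact h (by omega)]
      · rcases hdx with rfl | rfl | rfl <;> rcases hdy with rfl | rfl | rfl <;> simp
    · rw [pv_contains_king kx ky _ _ hninb, pv_contains_amazon ax ay kx ky _ _ hninb]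
      rw [hkm, hat]
      rfl

theorem pv_pair_beq (x y ax ay : Int) :
    (((x, y) : Int × Int) == (ax, ay)) = (x == ax && y == ay) := rfl

theorem pv_main (king amazon : String)
    (hk : 2 ≤ king.toList.length) (ha : 2 ≤ amazon.toList.length) :
    solution king amazon = solution_alt king amazon := by
  match hkl : king.toList, hal : amazon.toList with
  | [], _ => simp [hkl] at hk
  | [_], _ => simp [hkl] at hk
  | _ :: _ :: _, [] => simp [hal] at ha
  | _ :: _ :: _, [_] => simp [hal] at ha
  | k0 :: k1 :: kr, a0 :: a1 :: ar =>
  unfold solution solution_alt pvParse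
  rw [hkl, hal]
  dsimp only
  rw [pvAllPositions, List.foldl_flatMap]
  simp only [List.foldl_map]
  apply PySem.List.foldl_congr_mem
  intro acc xn hxn
  apply PySem.List.foldl_congr_mem
  intro res yn hyn
  have hxn' : ∃ m : Nat, m < 8 ∧ xn = (m : Int) := by simpa using hxn
  have hyn' : ∃ m : Nat, m < 8 ∧ yn = (m : Int) := by simpa using hyn
  obtain ⟨xm, hxm, rfl⟩ := hxn'
  obtain ⟨ym, hym, rfl⟩ := hyn'
  have hx : pvInbP (xm : Int) (ym : Int) := by
    simp only [pvInbP]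
    omega
  rw [pv_contains_king _ _ _ _ hx]
  rw [show ((((xm : Int), (ym : Int)) : Int × Int) != ((a0.toNat : Int) - 97, (a1.toNat : Int) - 49) &&
        (((xm : Int), (ym : Int)) : Int × Int) != ((k0.toNat : Int) - 97, (k1.toNat : Int) - 49) &&
        !pvIsKingMove ((k0.toNat : Int) - 97) ((k1.toNat : Int) - 49) (xm : Int) (ym : Int)) =
      !((xm : Int) == (a0.toNat : Int) - 97 && (ym : Int) == (a1.toNat : Int) - 49 ||
        (xm : Int) == (k0.toNat : Int) - 97 && (ym : Int) == (k1.toNat : Int) - 49 ||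
        pvIsKingMove ((k0.toNat : Int) - 97) ((k1.toNat : Int) - 49) (xm : Int) (ym : Int)) from by
    simp [bne, pv_pair_beq, Bool.not_or, Bool.and_assoc]]
  cases hC : ((xm : Int) == (a0.toNat : Int) - 97 && (ym : Int) == (a1.toNat : Int) - 49 ||
      (xm : Int) == (k0.toNat : Int) - 97 && (ym : Int) == (k1.toNat : Int) - 49 ||
      pvIsKingMove ((k0.toNat : Int) - 97) ((k1.toNat : Int) - 49) (xm : Int) (ym : Int)) with
  | true => simp
  | false =>
    rw [if_pos (show (!false) = true by simp), if_neg (show ¬(false = true) by simp)]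
    have hidx : pvCheck ((xm : Int), (ym : Int))
        (PySem.Set.ofList (pvNeighbours ((k0.toNat : Int) - 97, (k1.toNat : Int) - 49)))
        (PySem.Set.ofList (pvAmazonMoves ((a0.toNat : Int) - 97, (a1.toNat : Int) - 49)
          ((k0.toNat : Int) - 97, (k1.toNat : Int) - 49))) =
        ((if (!pvAttacked ((a0.toNat : Int) - 97) ((a1.toNat : Int) - 49) ((k0.toNat : Int) - 97)
              ((k1.toNat : Int) - 49) (xm : Int) (ym : Int)) = true then 2 else 0) +
          if (([-1, 0, 1] : List Int).any fun dx => ([-1, 0, 1] : List Int).any fun dy =>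
                pvInbB ((xm : Int) + dx) ((ym : Int) + dy) && !(dx == 0 && dy == 0) &&
                  !pvIsKingMove ((k0.toNat : Int) - 97) ((k1.toNat : Int) - 49) ((xm : Int) + dx) ((ym : Int) + dy) &&
                  !pvAttacked ((a0.toNat : Int) - 97) ((a1.toNat : Int) - 49) ((k0.toNat : Int) - 97)
                    ((k1.toNat : Int) - 49) ((xm : Int) + dx) ((ym : Int) + dy)) = true then 1 else 0) := by
      unfold pvCheck
      rw [pv_contains_amazon _ _ _ _ _ _ hx, pv_canmove_eq]
    rw [hidx]

-- ===== VERDICT (by name: the statement is the Claim_ definition above) =====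
theorem solution_spec : Claim_equal_solution := by
  intro king amazon _ hpre
  obtain ⟨h1, h2⟩ := hpre
  unfold Spec_solution
  exact pv_main king amazon h1 h2
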